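-- pv_equiv track=rewrite | github.com/vinithbraj/openfabric | src/aor_runtime/runtime/markdown.py | add_section_breaks
-- ===== SOURCE A (Python) =====
-- SECTION_BREAK = "---"
--
-- def add_section_breaks(markdown: str) -> str:
--     """Add section breaks for the surrounding runtime workflow.
--
--     Inputs:
--         Receives markdown for this function; type hints and validators define accepted shapes.
--
--     Returns:
--         Returns the computed value described by the function name and type hints.
--
--     Used by:
--         Used by planning, execution, validation, and presentation code paths that import or call aor_runtime.runtime.markdown.add_section_breaks.
--     """
--     lines = str(markdown or "").splitlines()
--     rendered: list[str] = []
--     in_code_block = False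
--     seen_section = False
--     for line in lines:
--         if line.lstrip().startswith("```"):
--             in_code_block = not in_code_block
--         if not in_code_block and line.startswith("## "):
--             if seen_section:
--                 while rendered and rendered[-1] == "":
--                     rendered.pop()
--                 rendered.extend(["", SECTION_BREAK, ""])
--             seen_section = True
--         rendered.append(line)
--     return "\n".join(rendered).strip()
-- ===== SOURCE B (Python) =====
-- SECTION_BREAK = "---"
--
--
-- def _is_fence(line):
--     return line.lstrip().startswith("```")
--
--
-- def _rstrip_blanks(seg):
--     while seg and seg[-1] == "":
--         seg.pop()
--     return seg
--
--
-- def add_section_breaks(markdown: str) -> str: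
--     """Staged re-implementation: build a fence prefix-count table, list the
--     top-level heading indices, slice the lines into blocks at those cut points,
--     trim each non-final block's trailing blank lines, and join with the break."""
--     lines = str(markdown or "").splitlines()
--     pref = [0]
--     for line in lines:
--         pref.append(pref[-1] + (1 if _is_fence(line) else 0))
--     heads = [i for i, line in enumerate(lines)
--              if line.startswith("## ") and pref[i] % 2 == 0]
--     cuts = heads[1:]  # the first heading stays with the preamble
--     bounds = [0] + cuts + [len(lines)]
--     segs = [lines[a:b] for a, b in zip(bounds, bounds[1:])]
--     parts = [_rstrip_blanks(s) for s in segs[:-1]] + [segs[-1]]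
--     sep = "\n\n" + SECTION_BREAK + "\n\n"
--     return sep.join("\n".join(p) for p in parts).strip()
-- ===== Notes on version B (the rewrite author's own statement) =====
-- stated objective: alternative
-- what changed: B replaces A's single-pass state machine that mutates one flat rendered list (tail pops + in-place separator splices) by a staged pipeline: a fence prefix-count table, then the list of top-level heading indices, then slicing the lines into blocks at those cut points, trimming each non-final block and joining with one constant separator.
import Mathlib
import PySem

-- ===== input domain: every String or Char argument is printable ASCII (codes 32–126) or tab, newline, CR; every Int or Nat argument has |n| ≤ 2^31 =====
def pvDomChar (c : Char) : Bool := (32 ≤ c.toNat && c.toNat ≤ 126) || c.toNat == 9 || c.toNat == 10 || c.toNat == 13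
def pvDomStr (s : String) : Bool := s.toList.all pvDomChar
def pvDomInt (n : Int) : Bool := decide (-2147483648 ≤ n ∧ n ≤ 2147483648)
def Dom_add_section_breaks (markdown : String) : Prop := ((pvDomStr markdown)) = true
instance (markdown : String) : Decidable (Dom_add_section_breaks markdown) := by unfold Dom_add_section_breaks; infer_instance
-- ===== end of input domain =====

-- B replaces A's single-pass state machine over one mutated flat line list by a staged
-- pipeline (fence prefix-count table -> top-level heading indices -> slicing into blocks
-- -> trim -> join); objective: alternative, same asymptotic cost.

-- ===== PORT A =====
def sectionBreak : String := "---"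

-- exact port of the loop 'while rendered and rendered[-1] == "": rendered.pop()'
-- (drops exactly the trailing elements equal to ""); also B's _rstrip_blanks helper
def popTrail : List String → List String
  | [] => []
  | x :: xs =>
    match popTrail xs with
    | [] => if x == "" then [] else [x]
    | y :: ys => x :: y :: ys

def stepA (st : List String × Bool × Bool) (line : String) : List String × Bool × Bool :=
  let rendered := st.1
  let in_code := if PySem.Str.startswith (PySem.Str.lstrip line) "```" then !st.2.1 else st.2.1
  let seen := st.2.2
  if !in_code && PySem.Str.startswith line "## " then
    if seen then (popTrail rendered ++ ["", sectionBreak, ""] ++ [line], in_code, true)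
    else (rendered ++ [line], in_code, true)
  else (rendered ++ [line], in_code, seen)

def add_section_breaks (markdown : String) : String :=
  let lines := PySem.Str.splitlines (if markdown = "" then "" else markdown)
  let st := lines.foldl stepA ([], false, false)
  PySem.Str.strip (PySem.Str.join "\n" st.1)

-- ===== PORT B =====
-- B's _is_fence helper
def fenceLine (line : String) : Bool := PySem.Str.startswith (PySem.Str.lstrip line) "```"

-- the 'pref' loop: pref = [0]; for line in lines: pref.append(pref[-1] + (1 if fence else 0))
def prefCounts (lines : List String) : List Int :=
  lines.foldl (fun acc l => acc ++ [acc.getLastD 0 + (if fenceLine l then 1 else 0)]) [0]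

-- heads = [i for i, line in enumerate(lines) if line.startswith("## ") and pref[i] % 2 == 0]
def headsOf (lines : List String) : List Int :=
  ((PySem.List.enumerate lines 0).filter
    (fun p => PySem.Str.startswith p.2 "## " &&
      (PySem.Int.mod (PySem.List.pyGetD (prefCounts lines) p.1 0) 2 == 0))).map (·.1)

-- bounds = [0] + heads[1:] + [len(lines)]
def boundsOf (lines : List String) : List Int :=
  [0] ++ PySem.List.slice (headsOf lines) (some 1) none ++ [(lines.length : Int)]

-- segs = [lines[a:b] for a, b in zip(bounds, bounds[1:])]
def segsOf (lines : List String) : List (List String) :=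
  ((boundsOf lines).zip (PySem.List.slice (boundsOf lines) (some 1) none)).map
    (fun ab => PySem.List.slice lines (some ab.1) (some ab.2))

def add_section_breaks_alt (markdown : String) : String :=
  let lines := PySem.Str.splitlines (if markdown = "" then "" else markdown)
  let segs := segsOf lines
  -- parts = [_rstrip_blanks(s) for s in segs[:-1]] + [segs[-1]]  (segs is never empty)
  let parts := (PySem.List.slice segs none (some (-1))).map popTrail ++
    [PySem.List.pyGetD segs (-1) []]
  PySem.Str.strip
    (PySem.Str.join ("\n\n" ++ sectionBreak ++ "\n\n") (parts.map (PySem.Str.join "\n")))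

-- ===== PRECONDITION & SPEC =====
def Spec_add_section_breaks (markdown : String) (out : String) : Prop := out = add_section_breaks_alt markdown
instance (markdown : String) (out : String) : Decidable (Spec_add_section_breaks markdown out) := by unfold Spec_add_section_breaks; infer_instance

-- ===== CLAIM (what is proved, stated in full; the proofs are below) =====
def Claim_equal_add_section_breaks : Prop := ∀ (markdown : String), Dom_add_section_breaks markdown → Spec_add_section_breaks markdown (add_section_breaks markdown)


-- ===== LEMMAS AND PROOFS =====

-- proof-side single-pass block builder: the bridge between A's flat fold and B's slices
def blkStep (st : List (List String) × List String × Bool × Bool) (line : String) :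
    List (List String) × List String × Bool × Bool :=
  let blocks := st.1
  let current := st.2.1
  let in_code := if fenceLine line then !st.2.2.1 else st.2.2.1
  let seen := st.2.2.2
  if !in_code && PySem.Str.startswith line "## " then
    if seen then (blocks ++ [popTrail current], [line], in_code, true)
    else (blocks, current ++ [line], in_code, true)
  else (blocks, current ++ [line], in_code, seen)

-- the staged (B-side) reading of the same loop state
def stagedState (p : List String) : List (List String) × List String × Bool × Bool :=
  ((segsOf p).dropLast.map popTrail, (segsOf p).getLastD [],
    p.countP fenceLine % 2 == 1, !(headsOf p).isEmpty)

-- A's flat rendered list, expressed from blocks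
def flatB (bs : List (List String)) : List String :=
  bs.flatMap (fun b => b ++ ["", sectionBreak, ""])

lemma popTrail_nil_of_all (v : List String) (h : ∀ x ∈ v, x = "") : popTrail v = [] := by
  induction v with
  | nil => rfl
  | cons a vs ih =>
    have ha : a = "" := h a (by simp)
    have : popTrail vs = [] := ih (fun x hx => h x (by simp [hx]))
    simp [popTrail, this, ha]

lemma popTrail_spec (v : List String) (h : ∃ x ∈ v, x ≠ "") :
    popTrail v ≠ [] ∧ ∃ x ∈ popTrail v, x ≠ "" := by
  induction v with
  | nil => simp at h
  | cons a vs ih =>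
    by_cases hv : ∃ x ∈ vs, x ≠ ""
    · obtain ⟨h1, x, hx, hxne⟩ := ih hv
      cases hpt : popTrail vs with
      | nil => exact absurd hpt h1
      | cons y ys =>
        refine ⟨by simp [popTrail, hpt], ?_⟩
        exact ⟨x, by simp [popTrail, hpt, hpt ▸ hx], hxne⟩
    · have hv' : ∀ x ∈ vs, x = "" := fun x hx => not_not.mp (fun hne => hv ⟨x, hx, hne⟩)
      have hnil : popTrail vs = [] := popTrail_nil_of_all vs hv'
      have ha : a ≠ "" := by
        obtain ⟨x, hx, hxne⟩ := h
        rcases List.mem_cons.mp hx with rfl | hx'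
        · exact hxne
        · exact absurd (hv' x hx') hxne
      refine ⟨?_, ⟨a, ?_, ha⟩⟩ <;> simp [popTrail, hnil, ha]

lemma popTrail_append (u v : List String) (h : popTrail v ≠ []) :
    popTrail (u ++ v) = u ++ popTrail v := by
  induction u with
  | nil => simp
  | cons a us ih =>
    cases hx : us ++ popTrail v with
    | nil =>
      rcases List.append_eq_nil_iff.mp hx with ⟨_, h2⟩
      exact absurd h2 h
    | cons y ys =>
      simp only [List.cons_append, popTrail, ih, hx]

lemma heading_ne_empty (line : String) (h : PySem.Str.startswith line "## " = true) :
    line ≠ "" := by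
  intro hc
  subst hc
  simp [PySem.Str.startswith, PySem.Chars.startswith] at h

-- a '## ' heading is never a code-fence line (its first char is '#', not whitespace or '`')
lemma heading_not_fence (line : String) (h : PySem.Str.startswith line "## " = true) :
    fenceLine line = false := by
  have hpre : ("## ".toList) <+: line.toList :=
    (PySem.Chars.startswith_iff line.toList "## ".toList).mp (by simpa using h)
  obtain ⟨t, ht⟩ := hpre
  have ht' : line.toList = '#' :: '#' :: ' ' :: t := by
    rw [← ht]; rfl
  have hls : (PySem.Str.lstrip line).toList = '#' :: '#' :: ' ' :: t := by
    rw [PySem.Str.toList_lstrip, ht', PySem.Chars.lstrip]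
    rw [List.dropWhile_cons_of_neg (by decide)]
  unfold fenceLine
  simp only [PySem.Str.startswith, PySem.Chars.startswith, hls]
  simp [List.isPrefixOf_cons₂]

-- characterization of the prefix-count table: entry i is the fence count of the first i lines
lemma prefCounts_eq (p : List String) :
    prefCounts p =
      (List.range (p.length + 1)).map (fun i => (((p.take i).countP fenceLine : Nat) : Int)) := by
  induction p using List.reverseRecOn with
  | nil => rfl
  | append_singleton p l ih =>
    unfold prefCounts at ih ⊢
    rw [List.foldl_append, ih]
    simp only [List.foldl_cons, List.foldl_nil]
    have hlast :
        ((List.range (p.length + 1)).map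
          (fun i => (((p.take i).countP fenceLine : Nat) : Int))).getLastD 0 =
          ((p.countP fenceLine : Nat) : Int) := by
      rw [List.range_succ, List.map_append]
      simp
    rw [hlast]
    rw [show (p ++ [l]).length + 1 = (p.length + 1) + 1 by simp]
    conv_rhs => rw [List.range_succ, List.map_append]
    congr 1
    · apply List.map_congr_left
      intro i hi
      have hi' : i ≤ p.length := by
        have := List.mem_range.mp hi; omega
      rw [List.take_append_of_le_length hi']
    · simp only [List.map_cons, List.map_nil]
      congr 1
      rw [List.take_of_length_le (by simp), List.countP_append]
      by_cases hf : fenceLine l <;> simp [hf]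

lemma pyGetD_prefCounts (p : List String) (k : Nat) (hk : k ≤ p.length) :
    PySem.List.pyGetD (prefCounts p) (k : Int) 0 = (((p.take k).countP fenceLine : Nat) : Int) := by
  rw [PySem.List.pyGetD_natCast, prefCounts_eq]
  exact PySem.List.getD_map_range _ _ _ _ (by omega)

lemma mod_two_cast (c : Nat) :
    (PySem.Int.mod ((c : Nat) : Int) 2 == 0) = (c % 2 == 0) := by
  rw [show ((2:Int)) = ((2:Nat):Int) by norm_num, PySem.Int.mod_natCast]
  rcases Nat.mod_two_eq_zero_or_one c with h | h <;> simp [h]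

-- appending one line extends the heading-index list by at most the new index
lemma headsOf_append (p : List String) (l : String) :
    headsOf (p ++ [l]) =
      headsOf p ++
        (if PySem.Str.startswith l "## " && (p.countP fenceLine % 2 == 0)
         then [(p.length : Int)] else []) := by
  unfold headsOf
  rw [PySem.List.enumerate_append]
  have he : PySem.List.enumerate [l] ((0:Int) + p.length) = [((p.length : Int), l)] := by
    simp [PySem.List.enumerate_cons, PySem.List.enumerate_nil]
  rw [he, List.filter_append, List.map_append]
  congr 1
  · congr 1
    apply List.filter_congr
    intro q hq
    obtain ⟨k, hk, rfl⟩ := (PySem.List.mem_enumerate_iff p 0 q).mp hq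
    simp only [zero_add]
    rw [pyGetD_prefCounts (p ++ [l]) k (by simp; omega),
      pyGetD_prefCounts p k (by omega),
      List.take_append_of_le_length (by omega)]
  · by_cases htop : (PySem.Str.startswith l "## " && (p.countP fenceLine % 2 == 0)) = true
    · have hs := (Bool.and_eq_true_iff.mp htop).1
      have hc := (Bool.and_eq_true_iff.mp htop).2
      rw [htop]
      rw [List.filter_cons]
      rw [if_pos ?_]
      · simp
      · simp only
        rw [pyGetD_prefCounts (p ++ [l]) p.length (by simp),
          List.take_append_of_le_length (by omega), List.take_length]
        rw [hs, mod_two_cast]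
        simpa using hc
    · have htop' : (PySem.Str.startswith l "## " && (p.countP fenceLine % 2 == 0)) = false := by
        simpa using htop
      rw [htop']
      rw [List.filter_cons]
      rw [if_neg ?_]
      · simp
      · simp only
        rw [pyGetD_prefCounts (p ++ [l]) p.length (by simp),
          List.take_append_of_le_length (by omega), List.take_length]
        rw [mod_two_cast]
        intro hcon
        rw [htop'] at hcon
        exact Bool.false_ne_true hcon

-- every heading index is a Nat strictly below the line count
lemma headsOf_mem (p : List String) {a : Int} (ha : a ∈ headsOf p) :
    ∃ k : Nat, a = (k : Int) ∧ k < p.length := by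
  unfold headsOf at ha
  obtain ⟨q, hq, rfl⟩ := List.mem_map.mp ha
  have hq' := (List.mem_filter.mp hq).1
  obtain ⟨k, hk, rfl⟩ := (PySem.List.mem_enumerate_iff p 0 q).mp hq'
  exact ⟨k, by simp, hk⟩

-- the bound list head 0 :: heads[1:]
def pB (p : List String) : List Int := 0 :: (headsOf p).tail

def slicerP (p : List String) (ab : Int × Int) : List String :=
  PySem.List.slice p (some ab.1) (some ab.2)

lemma zip_tail_concat (B : List Int) (x : Int) (hB : B ≠ []) :
    (B ++ [x]).zip ((B ++ [x]).tail) = B.zip B.tail ++ [(B.getLastD 0, x)] := by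
  induction B with
  | nil => exact absurd rfl hB
  | cons a B ih =>
    cases B with
    | nil => simp
    | cons b B' =>
      have h := ih (by simp)
      simp only [List.cons_append, List.tail_cons, List.zip_cons_cons] at h ⊢
      rw [h]
      simp

lemma segsOf_eq (p : List String) :
    segsOf p = ((pB p).zip (pB p).tail).map (slicerP p) ++
      [slicerP p ((pB p).getLastD 0, (p.length : Int))] := by
  unfold segsOf boundsOf
  rw [PySem.List.slice_from_one, PySem.List.slice_from_one]
  have hb : [(0:Int)] ++ (headsOf p).tail ++ [(p.length : Int)] = pB p ++ [(p.length : Int)] := by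
    simp [pB]
  rw [hb, zip_tail_concat (pB p) _ (by simp [pB]), List.map_append]
  rfl

lemma pB_mem (p : List String) {a : Int} (ha : a ∈ pB p) :
    ∃ k : Nat, a = (k : Int) ∧ k ≤ p.length := by
  rcases List.mem_cons.mp ha with rfl | ha'
  · exact ⟨0, by simp⟩
  · obtain ⟨k, rfl, hk⟩ := headsOf_mem p (List.mem_of_mem_tail ha')
    exact ⟨k, rfl, by omega⟩

lemma pB_last_mem (p : List String) : (pB p).getLastD 0 ∈ pB p := by
  unfold pB
  rw [List.getLastD_cons]
  exact List.getLastD_mem_cons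

-- a slice with both bounds within p ignores an appended line
lemma slice_prefix (p : List String) (l : String) (a b : Nat) (hb : b ≤ p.length) :
    PySem.List.slice (p ++ [l]) (some (a : Int)) (some (b : Int)) =
      PySem.List.slice p (some (a : Int)) (some (b : Int)) := by
  rw [PySem.List.slice_natCast, PySem.List.slice_natCast]
  rcases Nat.lt_or_ge a b with h | h
  · rw [List.drop_append_of_le_length (by omega),
      List.take_append_of_le_length (by simp; omega)]
  · rw [Nat.sub_eq_zero_of_le h]; simp

-- a slice running to the new end picks up the appended line
lemma slice_extend (p : List String) (l : String) (a : Nat) (ha : a ≤ p.length) :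
    PySem.List.slice (p ++ [l]) (some (a : Int)) (some ((p.length + 1 : Nat) : Int)) =
      PySem.List.slice p (some (a : Int)) (some ((p.length : Nat) : Int)) ++ [l] := by
  rw [PySem.List.slice_natCast, PySem.List.slice_natCast]
  rw [List.drop_append_of_le_length ha]
  rw [List.take_of_length_le (show (List.drop a p ++ [l]).length ≤ p.length + 1 - a by
    simp; omega)]
  rw [List.take_of_length_le (show (List.drop a p).length ≤ p.length - a by simp)]

-- CASE "extend": no new cut point — the last segment just grows by the new line
lemma segs_extend (p : List String) (l : String)
    (h : (headsOf (p ++ [l])).tail = (headsOf p).tail) :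
    (segsOf (p ++ [l])).dropLast = (segsOf p).dropLast ∧
      (segsOf (p ++ [l])).getLastD [] = (segsOf p).getLastD [] ++ [l] := by
  have hpB : pB (p ++ [l]) = pB p := by unfold pB; rw [h]
  have hlen : ((p ++ [l]).length : Int) = ((p.length + 1 : Nat) : Int) := by simp
  rw [segsOf_eq (p ++ [l]), segsOf_eq p, hpB, hlen]
  rw [List.dropLast_concat, List.dropLast_concat, List.getLastD_concat, List.getLastD_concat]
  constructor
  · apply List.map_congr_left
    intro ab hab
    obtain ⟨a, b⟩ := ab
    obtain ⟨ha, hb⟩ := List.of_mem_zip hab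
    obtain ⟨ka, rfl, hka⟩ := pB_mem p ha
    obtain ⟨kb, rfl, hkb⟩ := pB_mem p (List.mem_of_mem_tail hb)
    exact slice_prefix p l ka kb hkb
  · obtain ⟨k, hk, hk'⟩ := pB_mem p (pB_last_mem p)
    unfold slicerP
    rw [hk]
    exact slice_extend p l k hk'

-- CASE "cut": a new top-level heading past the first — the old last segment closes,
-- the new segment is exactly the new line
lemma segs_cut (p : List String) (l : String) (hH : headsOf p ≠ [])
    (h : headsOf (p ++ [l]) = headsOf p ++ [(p.length : Int)]) :
    (segsOf (p ++ [l])).dropLast = segsOf p ∧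
      (segsOf (p ++ [l])).getLastD [] = [l] := by
  have hpB : pB (p ++ [l]) = pB p ++ [(p.length : Int)] := by
    unfold pB
    rw [h]
    cases hc : headsOf p with
    | nil => exact absurd hc hH
    | cons a t => simp
  have hlen : ((p ++ [l]).length : Int) = ((p.length + 1 : Nat) : Int) := by simp
  rw [segsOf_eq (p ++ [l]), segsOf_eq p, hpB, hlen]
  rw [List.dropLast_concat, List.getLastD_concat]
  rw [zip_tail_concat (pB p) _ (by simp [pB]), List.map_append, List.getLastD_concat]
  constructor
  · congr 1
    · apply List.map_congr_left
      intro ab hab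
      obtain ⟨a, b⟩ := ab
      obtain ⟨ha, hb⟩ := List.of_mem_zip hab
      obtain ⟨ka, rfl, hka⟩ := pB_mem p ha
      obtain ⟨kb, rfl, hkb⟩ := pB_mem p (List.mem_of_mem_tail hb)
      exact slice_prefix p l ka kb hkb
    · simp only [List.map_cons, List.map_nil]
      congr 1
      obtain ⟨k, hk, hk'⟩ := pB_mem p (pB_last_mem p)
      unfold slicerP
      rw [hk]
      exact slice_prefix p l k p.length le_rfl
  · unfold slicerP
    simp only
    rw [PySem.List.slice_natCast]
    rw [List.drop_append_of_le_length le_rfl, List.drop_of_length_le le_rfl]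
    simp

lemma countP_concat (p : List String) (l : String) :
    (p ++ [l]).countP fenceLine =
      p.countP fenceLine + (if fenceLine l then 1 else 0) := by
  rw [List.countP_append]
  by_cases hf : fenceLine l <;> simp [hf]

-- one appended line advances the staged state exactly like the single-pass step
lemma staged_step (p : List String) (l : String) :
    stagedState (p ++ [l]) = blkStep (stagedState p) l := by
  have hheads := headsOf_append p l
  by_cases hd : PySem.Str.startswith l "## " = true
  · -- the new line is a '## ' heading; it is not a fence line
    have hf : fenceLine l = false := heading_not_fence l hd
    have hcount : (p ++ [l]).countP fenceLine = p.countP fenceLine := by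
      rw [countP_concat, hf]; simp
    by_cases hpar : (p.countP fenceLine % 2 == 0) = true
    · -- top-level heading
      have hpar1 : (p.countP fenceLine % 2 == 1) = false := by
        rcases Nat.mod_two_eq_zero_or_one (p.countP fenceLine) with h | h <;> simp [h] at hpar ⊢
      have hδ : headsOf (p ++ [l]) = headsOf p ++ [(p.length : Int)] := by
        rw [hheads, hd, hpar]; simp
      by_cases hseen : (headsOf p).isEmpty = true
      · -- first heading ever: no cut, the current block keeps growing
        have hH : headsOf p = [] := List.isEmpty_iff.mp hseen
        have htail : (headsOf (p ++ [l])).tail = (headsOf p).tail := by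
          rw [hδ, hH]; simp
        obtain ⟨h1, h2⟩ := segs_extend p l htail
        unfold stagedState blkStep
        simp only [hf, hd, hcount, hpar1, h1, h2, hδ, hH]
        simp
      · -- a later heading: close the current block
        have hH : headsOf p ≠ [] := by
          intro hc; rw [hc] at hseen; simp at hseen
        obtain ⟨h1, h2⟩ := segs_cut p l hH hδ
        unfold stagedState blkStep
        simp only [hf, hd, hcount, hpar1, h1, h2, hδ]
        have hne : (segsOf p) ≠ [] := by rw [segsOf_eq p]; simp
        have hgd : (segsOf p).getLastD [] = (segsOf p).getLast hne := by
          rw [List.getLastD_eq_getLast?, List.getLast?_eq_some_getLast hne]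
          rfl
        have hsplit : (segsOf p).dropLast ++ [(segsOf p).getLastD []] = segsOf p := by
          rw [hgd]
          exact List.dropLast_concat_getLast hne
        have hmap : List.map popTrail (segsOf p) =
            (segsOf p).dropLast.map popTrail ++ [popTrail ((segsOf p).getLastD [])] := by
          conv_lhs => rw [← hsplit]
          simp
        rw [hmap]
        simp [hseen, hH]
    · -- heading inside a code block: ordinary line
      have hpar0 : (p.countP fenceLine % 2 == 1) = true := by
        rcases Nat.mod_two_eq_zero_or_one (p.countP fenceLine) with h | h <;> simp [h] at hpar ⊢
      have htail : (headsOf (p ++ [l])).tail = (headsOf p).tail := by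
        rw [hheads, hd]
        simp [hpar]
      have hδ : headsOf (p ++ [l]) = headsOf p := by
        rw [hheads, hd]
        simp [hpar]
      obtain ⟨h1, h2⟩ := segs_extend p l htail
      unfold stagedState blkStep
      simp only [hf, hd, hcount, hpar0, h1, h2, hδ]
      simp
  · -- not a heading
    have hd' : PySem.Str.startswith l "## " = false := by simpa using hd
    have hδ : headsOf (p ++ [l]) = headsOf p := by
      rw [hheads, hd']; simp
    have htail : (headsOf (p ++ [l])).tail = (headsOf p).tail := by rw [hδ]
    obtain ⟨h1, h2⟩ := segs_extend p l htail
    have hcpar : ((p ++ [l]).countP fenceLine % 2 == 1) =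
        (if fenceLine l then !(p.countP fenceLine % 2 == 1) else (p.countP fenceLine % 2 == 1)) := by
      rw [countP_concat]
      by_cases hfl : fenceLine l <;>
        rcases Nat.mod_two_eq_zero_or_one (p.countP fenceLine) with h | h <;>
          simp [hfl, Nat.add_mod, h]
    unfold stagedState blkStep
    simp only [hd', Bool.and_false, h1, h2, hδ, hcpar]
    simp

lemma fold_blk (p : List String) :
    p.foldl blkStep ([], [], false, false) = stagedState p := by
  induction p using List.reverseRecOn with
  | nil =>
    unfold stagedState
    rw [show segsOf ([] : List String) = [[]] from rfl,
      show headsOf ([] : List String) = [] from rfl]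
    rfl
  | append_singleton p l ih =>
    rw [List.foldl_append, ih]
    simp only [List.foldl_cons, List.foldl_nil]
    exact (staged_step p l).symm

-- the joint loop invariant relating A's flat state to the block state
def InvAB (a : List String × Bool × Bool) (b : List (List String) × List String × Bool × Bool) : Prop :=
  a.1 = flatB b.1 ++ b.2.1 ∧ a.2.1 = b.2.2.1 ∧ a.2.2 = b.2.2.2 ∧
  (b.2.2.2 = true → ∃ x ∈ b.2.1, x ≠ "") ∧
  (∀ blk ∈ b.1, ∃ x ∈ blk, x ≠ "") ∧
  (b.1 ≠ [] → b.2.2.2 = true)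

lemma flatB_append_single (bs : List (List String)) (b : List String) :
    flatB (bs ++ [b]) = flatB bs ++ (b ++ ["", sectionBreak, ""]) := by
  simp [flatB]

lemma step_inv (a : List String × Bool × Bool)
    (b : List (List String) × List String × Bool × Bool) (line : String)
    (h : InvAB a b) : InvAB (stepA a line) (blkStep b line) := by
  obtain ⟨r, c, s⟩ := a
  obtain ⟨bs, cur, c', s'⟩ := b
  obtain ⟨h1, h2, h3, h4, h5, h6⟩ := h
  simp only at h1 h2 h3 h4 h5 h6
  subst h1 h2 h3
  simp only [stepA, blkStep, fenceLine]
  by_cases hcond : (!(if PySem.Str.startswith (PySem.Str.lstrip line) "```" then !c else c)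
      && PySem.Str.startswith line "## ") = true
  · have hline : line ≠ "" := heading_ne_empty line (by
      exact (Bool.and_eq_true_iff.mp hcond).2)
    by_cases hs : s = true
    · subst hs
      have hcur := h4 rfl
      obtain ⟨hne, hex⟩ := popTrail_spec cur hcur
      simp only [hcond, if_true]
      refine ⟨?_, rfl, rfl, ?_, ?_, ?_⟩
      · rw [popTrail_append _ _ hne, flatB_append_single]
        simp
      · intro _; exact ⟨line, by simp, hline⟩
      · intro blk hblk
        rcases List.mem_append.mp hblk with hb | hb
        · exact h5 blk hb
        · simp at hb; subst hb; exact hex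
      · intro _; rfl
    · have hs' : s = false := by simpa using hs
      subst hs'
      simp only [hcond, if_true, Bool.false_eq_true, if_false]
      refine ⟨by simp, rfl, rfl, ?_, h5, ?_⟩
      · intro _; exact ⟨line, by simp, hline⟩
      · intro hbs
        exact absurd (h6 hbs) Bool.false_ne_true
  · have hcond' : (!(if PySem.Str.startswith (PySem.Str.lstrip line) "```" then !c else c)
      && PySem.Str.startswith line "## ") = false := by simpa using hcond
    simp only [hcond', if_false, Bool.false_eq_true]
    refine ⟨by simp, rfl, rfl, ?_, h5, h6⟩
    · intro hsv
      obtain ⟨x, hx, hxne⟩ := h4 hsv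
      exact ⟨x, by simp [hx], hxne⟩

lemma loop_inv (lines : List String) :
    ∀ (a : List String × Bool × Bool) (b : List (List String) × List String × Bool × Bool),
      InvAB a b → InvAB (lines.foldl stepA a) (lines.foldl blkStep b) := by
  induction lines with
  | nil => intro a b h; exact h
  | cons line rest ih =>
    intro a b h
    exact ih _ _ (step_inv a b line h)

lemma chars_join_append (sep : List Char) (u v : List (List Char)) (hu : u ≠ []) (hv : v ≠ []) :
    PySem.Chars.join sep (u ++ v) = PySem.Chars.join sep u ++ sep ++ PySem.Chars.join sep v := by
  induction u with
  | nil => exact absurd rfl hu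
  | cons p u ih =>
    cases u with
    | nil =>
      cases v with
      | nil => exact absurd rfl hv
      | cons q vs =>
        simp [PySem.Chars.join_singleton, PySem.Chars.join_cons_cons]
    | cons p2 u2 =>
      rw [List.cons_append, List.cons_append, PySem.Chars.join_cons_cons,
        ← List.cons_append, ih (by simp), PySem.Chars.join_cons_cons]
      simp [List.append_assoc]

-- the Chars-level separator
def sepC : List Char := ['\n', '\n', '-', '-', '-', '\n', '\n']

def flatC (BS : List (List (List Char))) : List (List Char) :=
  BS.flatMap (fun B => B ++ [[], sectionBreak.toList, []])

lemma chars_final (BS : List (List (List Char))) (CUR : List (List Char))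
    (h4 : ∀ B ∈ BS, B ≠ []) (h5 : BS ≠ [] → CUR ≠ []) :
    PySem.Chars.join ['\n'] (flatC BS ++ CUR) =
      PySem.Chars.join sepC ((BS ++ [CUR]).map (PySem.Chars.join ['\n'])) := by
  induction BS with
  | nil => simp [flatC, PySem.Chars.join_singleton]
  | cons B BS' ih =>
    have hB : B ≠ [] := h4 B (by simp)
    have hcur : CUR ≠ [] := h5 (by simp)
    have hrest : flatC BS' ++ CUR ≠ [] := by
      intro hc
      exact hcur (List.append_eq_nil_iff.mp hc).2
    have hstep : flatC (B :: BS') ++ CUR =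
        B ++ ([] :: sectionBreak.toList :: [] :: (flatC BS' ++ CUR)) := by
      simp [flatC]
    rw [hstep, chars_join_append _ B _ hB (by simp)]
    cases hr : flatC BS' ++ CUR with
    | nil => exact absurd hr hrest
    | cons R RS =>
      rw [PySem.Chars.join_cons_cons, PySem.Chars.join_cons_cons, PySem.Chars.join_cons_cons,
        ← hr, ih (fun b hb => h4 b (by simp [hb])) (fun _ => hcur)]
      have hmap : ((B :: BS') ++ [CUR]).map (PySem.Chars.join ['\n']) =
          PySem.Chars.join ['\n'] B :: (BS' ++ [CUR]).map (PySem.Chars.join ['\n']) := by simp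
      rw [hmap]
      cases hm : (BS' ++ [CUR]).map (PySem.Chars.join ['\n']) with
      | nil => simp at hm
      | cons M MS =>
        rw [PySem.Chars.join_cons_cons, ← hm]
        have : sectionBreak.toList = ['-', '-', '-'] := by decide
        simp [sepC, this]

lemma final_join (bs : List (List String)) (cur : List String)
    (h4 : ∀ blk ∈ bs, blk ≠ []) (h5 : bs ≠ [] → cur ≠ []) :
    PySem.Str.join "\n" (flatB bs ++ cur) =
      PySem.Str.join ("\n\n" ++ sectionBreak ++ "\n\n") ((bs ++ [cur]).map (PySem.Str.join "\n")) := by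
  apply String.toList_inj.mp
  rw [PySem.Str.toList_join, PySem.Str.toList_join]
  have hnl : ("\n" : String).toList = ['\n'] := by decide
  have hsep : ("\n\n" ++ sectionBreak ++ "\n\n").toList = sepC := by decide
  rw [hnl, hsep]
  have hL : List.map String.toList (flatB bs ++ cur) =
      flatC (bs.map (List.map String.toList)) ++ cur.map String.toList := by
    simp [flatB, flatC, List.map_flatMap, List.flatMap_map]
  have hR : List.map String.toList ((bs ++ [cur]).map (PySem.Str.join "\n")) =
      ((bs.map (List.map String.toList)) ++ [cur.map String.toList]).map
        (PySem.Chars.join ['\n']) := by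
    simp [List.map_map, Function.comp, PySem.Str.toList_join, hnl]
  rw [hL, hR]
  exact chars_final _ _
    (by
      intro B hB
      obtain ⟨blk, hblk, rfl⟩ := List.mem_map.mp hB
      simpa using h4 blk hblk)
    (by
      intro hne
      have : bs ≠ [] := by intro hc; subst hc; simp at hne
      simpa using h5 this)

lemma pyGetD_neg_one {α : Type} (xs : List α) (d : α) (h : xs ≠ []) :
    PySem.List.pyGetD xs (-1) d = xs.getLastD d := by
  unfold PySem.List.pyGetD PySem.List.pyGet? PySem.List.pyIdx?
  have hl : 0 < xs.length := List.length_pos_iff.mpr h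
  simp only [show ¬((0:Int) ≤ -1) by norm_num, if_false]
  rw [if_pos (by omega : -(xs.length:Int) ≤ -1)]
  simp only [Option.bind]
  rw [show (-(-1:Int)).toNat = 1 by norm_num]
  rw [List.getLastD_eq_getLast?, List.getLast?_eq_getElem?]

-- ===== VERDICT (by name: the statement is the Claim_ definition above) =====
set_option maxHeartbeats 1000000 in
theorem add_section_breaks_spec : Claim_equal_add_section_breaks := by
  intro markdown _
  show add_section_breaks markdown = add_section_breaks_alt markdown
  unfold add_section_breaks add_section_breaks_alt
  simp only
  set L := PySem.Str.splitlines (if markdown = "" then "" else markdown) with hL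
  have hinv := loop_inv L ([], false, false) ([], [], false, false)
    ⟨by simp [flatB], rfl, rfl, by simp, by simp, by simp⟩
  rw [fold_blk L] at hinv
  unfold stagedState at hinv
  unfold InvAB at hinv
  obtain ⟨h1, -, -, h4, h5, h6⟩ := hinv
  simp only at h1 h4 h5 h6
  rw [h1]
  have hne : segsOf L ≠ [] := by rw [segsOf_eq L]; simp
  rw [PySem.List.slice_to_neg_one]
  rw [pyGetD_neg_one _ _ hne]
  have hc4 : ∀ blk ∈ (segsOf L).dropLast.map popTrail, blk ≠ [] := by
    intro blk hblk
    exact List.ne_nil_of_mem (h5 blk hblk).choose_spec.1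
  have hc5 : (segsOf L).dropLast.map popTrail ≠ [] → (segsOf L).getLastD [] ≠ [] := by
    intro hneb
    exact List.ne_nil_of_mem (h4 (h6 hneb)).choose_spec.1
  have hfj := final_join ((segsOf L).dropLast.map popTrail) ((segsOf L).getLastD []) hc4 hc5
  exact congrArg PySem.Str.strip hfj
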